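-- pv_equiv track=rewrite | github.com/highly-illogical/project-euler | python/p173.py | laminae
-- ===== SOURCE A (Python) =====
-- def laminae(n):
--     side = 3
--     t = 0
--     while (side**2 - (side-2)**2) <= n:
--         hole = side-2
--         while hole > 0:
--             if side**2 - hole**2 <= n:
--                 t += 1
--                 hole -= 2
--             else:
--                 break
--         side += 1
--     return t
-- ===== SOURCE B (Python) =====
-- def laminae(n):
--     # A lamina with outer side s and hole side h (same parity, 0 < h <= s-2)
--     # uses s*s - h*h tiles.  Writing a = (s+h)//2, b = (s-h)//2 gives a > b >= 1
--     # and tile count 4*a*b, so we count pairs (a, b) directly: for each b the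
--     # valid a are b+1 .. n//(4*b), giving a closed-form inner count.
--     t = 0
--     b = 1
--     while 4 * b * (b + 1) <= n:
--         t += n // (4 * b) - b
--         b += 1
--     return t
-- ===== Notes on version B (the rewrite author's own statement) =====
-- stated objective: faster
-- what changed: Instead of enumerating every outer side and scanning all hole sizes one by one, B reparametrizes each lamina (side s, hole h) as the pair (a,b)=((s+h)/2,(s-h)/2) with tile count 4ab, and for each b counts all valid a at once with the closed form n//(4b)-b.
import Mathlib
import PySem

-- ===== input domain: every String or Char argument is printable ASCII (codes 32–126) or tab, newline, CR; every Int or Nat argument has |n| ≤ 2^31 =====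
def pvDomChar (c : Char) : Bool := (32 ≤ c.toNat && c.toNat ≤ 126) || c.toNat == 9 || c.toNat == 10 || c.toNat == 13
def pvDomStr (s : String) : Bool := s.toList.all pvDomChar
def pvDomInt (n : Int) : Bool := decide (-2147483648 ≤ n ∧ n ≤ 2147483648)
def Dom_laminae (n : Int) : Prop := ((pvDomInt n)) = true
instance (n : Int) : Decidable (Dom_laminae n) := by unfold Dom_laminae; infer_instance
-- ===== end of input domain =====

-- B replaces A's side-by-side scan over all hole sizes by the (a,b)=((s+h)/2,(s-h)/2)
-- reparametrization with a closed-form inner count; a timing run reports it measurably faster.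

-- ===== PORT A =====
-- termination lemmas for the ports (cited by name in decreasing_by; kept tiny on purpose)
theorem innerDec (hole : Int) (h : 0 < hole) : (hole - 2).toNat < hole.toNat := by omega

theorem outerDec (n side : Int) (h : side ^ 2 - (side - 2) ^ 2 ≤ n) :
    (n + 1 - 4 * (side + 1 - 1)).toNat < (n + 1 - 4 * (side - 1)).toNat := by
  have e : side ^ 2 - (side - 2) ^ 2 = 4 * side - 4 := by ring
  rw [e] at h; omega

theorem altDecA (b : Int) (hb : b ≤ 0) : (1 - (b + 1)).toNat < (1 - b).toNat := by omega

theorem altDecEq (b : Int) (hb : ¬ b ≤ 0) : (1 - (b + 1)).toNat = (1 - b).toNat := by omega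

theorem altDecB (n b : Int) (hb : ¬ b ≤ 0) (h : 4 * b * (b + 1) ≤ n) :
    (n + 1 - 4 * (b + 1) * (b + 1 + 1)).toNat < (n + 1 - 4 * b * (b + 1)).toNat := by
  have e : 4 * (b + 1) * (b + 1 + 1) = 4 * b * (b + 1) + 8 * (b + 1) := by ring
  omega

-- inner 'while hole > 0: …' loop of A
def laminaeInner (n side hole t : Int) : Int :=
  if h1 : hole > 0 then
    if side ^ 2 - hole ^ 2 ≤ n then
      laminaeInner n side (hole - 2) (t + 1)
    else t
  else t
termination_by hole.toNat
decreasing_by exact innerDec hole h1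

-- outer 'while side**2 - (side-2)**2 <= n: …' loop of A
def laminaeOuter (n side t : Int) : Int :=
  if h : side ^ 2 - (side - 2) ^ 2 ≤ n then
    laminaeOuter n (side + 1) (laminaeInner n side (side - 2) t)
  else t
termination_by (n + 1 - 4 * (side - 1)).toNat
decreasing_by exact outerDec n side h

def laminae (n : Int) : Int := laminaeOuter n 3 0

-- ===== PORT B =====
-- 'while 4*b*(b+1) <= n: t += n // (4*b) - b; b += 1' loop of B
def laminaeAltLoop (n b t : Int) : Int :=
  if h : 4 * b * (b + 1) ≤ n then
    laminaeAltLoop n (b + 1) (t + PySem.Int.floordiv n (4 * b) - b)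
  else t
termination_by ((1 - b).toNat, (n + 1 - 4 * b * (b + 1)).toNat)
decreasing_by
  by_cases hb : b ≤ 0
  · exact Prod.Lex.left _ _ (altDecA b hb)
  · rw [altDecEq b hb]
    exact Prod.Lex.right _ (altDecB n b hb h)

def laminae_alt (n : Int) : Int := laminaeAltLoop n 1 0

-- ===== PRECONDITION & SPEC =====
def Spec_laminae (n : Int) (out : Int) : Prop := out = laminae_alt n
instance (n : Int) (out : Int) : Decidable (Spec_laminae n out) := by unfold Spec_laminae; infer_instance

-- ===== CLAIM (what is proved, stated in full; the proofs are below) =====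
def Claim_equal_laminae : Prop := ∀ (n : Int), Dom_laminae n → Spec_laminae n (laminae n)

-- ===== LEMMAS AND PROOFS =====

-- per-side count of A's inner loop: number of hole steps j ≥ 1 that the loop counts
def tA (n s : Int) (lo : Nat) : Nat :=
  ((Finset.Icc lo n.toNat).filter
    (fun (j : Nat) => 1 ≤ s - 2 * (j : Int) ∧ s ^ 2 - (s - 2 * (j : Int)) ^ 2 ≤ n)).card

-- per-b count of B: number of a with b < a and 4*a*b ≤ n
def tB (n : Int) (b : Nat) : Nat :=
  ((Finset.Icc 1 n.toNat).filter (fun (a : Nat) => b < a ∧ 4 * a * b ≤ n.toNat)).card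

lemma Icc_insert (b N : Nat) (hb : b ≤ N) :
    Finset.Icc b N = insert b (Finset.Icc (b + 1) N) := by
  ext x; simp [Finset.mem_Icc]; omega

lemma not_mem_Icc_succ (b N : Nat) : b ∉ Finset.Icc (b + 1) N := by
  simp [Finset.mem_Icc]

lemma filter_Icc_card_succ (p : Nat → Prop) [DecidablePred p] (b N : Nat) (hb : b ≤ N) :
    ((Finset.Icc b N).filter p).card
      = (if p b then 1 else 0) + ((Finset.Icc (b + 1) N).filter p).card := by
  rw [Icc_insert b N hb, Finset.filter_insert]
  split_ifs with hp
  · rw [Finset.card_insert_of_notMem (by simp [Finset.mem_Icc])]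
    omega
  · simp

theorem inner_eq (n s : Int) (hn : 0 ≤ n) (hsn : s ≤ n) (b : Nat) (hb : 1 ≤ b) (t : Int) :
    laminaeInner n s (s - 2 * (b : Int)) t = t + (tA n s b : Int) := by
  rw [laminaeInner, tA]
  split_ifs with h1 h2
  · have hbN : b ≤ n.toNat := by omega
    have e2 : s - 2 * (b : Int) - 2 = s - 2 * ((b + 1 : Nat) : Int) := by push_cast; ring
    rw [e2, inner_eq n s hn hsn (b + 1) (by omega) (t + 1)]
    rw [tA, filter_Icc_card_succ _ b n.toNat hbN,
        if_pos (⟨by omega, h2⟩ : 1 ≤ s - 2 * (b : Int) ∧ s ^ 2 - (s - 2 * (b : Int)) ^ 2 ≤ n)]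
    push_cast; ring
  · have hz : ((Finset.Icc b n.toNat).filter
        (fun (j : Nat) => 1 ≤ s - 2 * (j : Int) ∧ s ^ 2 - (s - 2 * (j : Int)) ^ 2 ≤ n)).card = 0 := by
      rw [Finset.card_eq_zero, Finset.filter_eq_empty_iff]
      intro j hj
      simp only [Finset.mem_Icc] at hj
      rintro ⟨hj1, hj2⟩
      have hjb : (b : Int) ≤ (j : Int) := by exact_mod_cast hj.1
      have hle : s - 2 * (j : Int) ≤ s - 2 * (b : Int) := by omega
      have hnn : (0 : Int) ≤ s - 2 * (j : Int) := by omega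
      have hsq : (s - 2 * (j : Int)) ^ 2 ≤ (s - 2 * (b : Int)) ^ 2 := by nlinarith
      omega
    rw [hz]; simp
  · have hz : ((Finset.Icc b n.toNat).filter
        (fun (j : Nat) => 1 ≤ s - 2 * (j : Int) ∧ s ^ 2 - (s - 2 * (j : Int)) ^ 2 ≤ n)).card = 0 := by
      rw [Finset.card_eq_zero, Finset.filter_eq_empty_iff]
      intro j hj
      simp only [Finset.mem_Icc] at hj
      rintro ⟨hj1, hj2⟩
      have hjb : (b : Int) ≤ (j : Int) := by exact_mod_cast hj.1
      omega
    rw [hz]; simp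
termination_by n.toNat + 1 - b
decreasing_by omega

theorem outer_eq (n : Int) (hn : 0 ≤ n) (s : Int) (hs : 3 ≤ s) (t : Int) :
    laminaeOuter n s t = t + ((∑ j ∈ Finset.Icc s.toNat n.toNat, tA n (j : Int) 1 : Nat) : Int) := by
  rw [laminaeOuter]
  split_ifs with h
  · have e : s ^ 2 - (s - 2) ^ 2 = 4 * s - 4 := by ring
    rw [e] at h
    have hsn : s ≤ n := by omega
    have hsN : s.toNat ≤ n.toNat := by omega
    have einner : s - 2 = s - 2 * ((1 : Nat) : Int) := by push_cast; ring
    rw [einner, inner_eq n s hn hsn 1 le_rfl t]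
    have e1 : (s + 1).toNat = s.toNat + 1 := by omega
    rw [outer_eq n hn (s + 1) (by omega), e1,
        Icc_insert s.toNat n.toNat hsN, Finset.sum_insert (not_mem_Icc_succ _ _)]
    have ecast : ((s.toNat : Nat) : Int) = s := by omega
    rw [ecast]
    push_cast; ring
  · have e : s ^ 2 - (s - 2) ^ 2 = 4 * s - 4 := by ring
    rw [e] at h
    have hz : ∀ j ∈ Finset.Icc s.toNat n.toNat, tA n (j : Int) 1 = 0 := by
      intro j hj
      simp only [Finset.mem_Icc] at hj
      rw [tA, Finset.card_eq_zero, Finset.filter_eq_empty_iff]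
      intro k hk
      simp only [Finset.mem_Icc] at hk
      rintro ⟨hk1, hk2⟩
      have hjs : s ≤ (j : Int) := by omega
      have hk1' : (1 : Int) ≤ (k : Int) := by exact_mod_cast hk.1
      have key : (j : Int) ^ 2 - ((j : Int) - 2 * (k : Int)) ^ 2
          = 4 * (k : Int) * ((j : Int) - (k : Int)) := by ring
      have hprod : ((k : Int) - 1) * ((j : Int) - (k : Int) - 1) ≥ 0 :=
        mul_nonneg (by omega) (by omega)
      nlinarith
    rw [Finset.sum_eq_zero hz]; simp
termination_by n.toNat + 1 - s.toNat
decreasing_by omega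

theorem alt_eq (n : Int) (hn : 0 ≤ n) (b : Nat) (hb : 1 ≤ b) (t : Int) :
    laminaeAltLoop n (b : Int) t = t + ((∑ j ∈ Finset.Icc b n.toNat, tB n j : Nat) : Int) := by
  rw [laminaeAltLoop]
  split_ifs with h
  · have hb' : (1 : Int) ≤ (b : Int) := by exact_mod_cast hb
    have hcast : ((4 * b * (b + 1) : Nat) : Int) = 4 * (b : Int) * ((b : Int) + 1) := by
      push_cast; ring
    have hbz : (b : Int) ≤ 4 * (b : Int) * ((b : Int) + 1) := by nlinarith [hb']
    have hbN : b ≤ n.toNat := by omega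
    have hN : (n.toNat : Int) = n := Int.toNat_of_nonneg hn
    have hcond : 4 * b * (b + 1) ≤ n.toNat := by omega
    have e1 : ((b : Int) + 1) = ((b + 1 : Nat) : Int) := by push_cast; ring
    rw [e1, alt_eq n hn (b + 1) (by omega)]
    rw [Icc_insert b n.toNat hbN, Finset.sum_insert (not_mem_Icc_succ _ _)]
    have hdiv : ∀ a : Nat, a ≤ n.toNat / (4 * b) ↔ a * (4 * b) ≤ n.toNat :=
      fun a => Nat.le_div_iff_mul_le (by omega)
    have hset : (Finset.Icc 1 n.toNat).filter (fun a => b < a ∧ 4 * a * b ≤ n.toNat)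
        = Finset.Icc (b + 1) (n.toNat / (4 * b)) := by
      ext a
      simp only [Finset.mem_filter, Finset.mem_Icc, hdiv]
      constructor
      · rintro ⟨⟨ha1, ha2⟩, ha3, ha4⟩
        exact ⟨ha3, by rw [show a * (4 * b) = 4 * a * b from by ring]; exact ha4⟩
      · rintro ⟨ha1, ha2⟩
        have haa : a ≤ a * (4 * b) := Nat.le_mul_of_pos_right a (by omega)
        exact ⟨⟨by omega, by omega⟩, ha1, by rw [show 4 * a * b = a * (4 * b) from by ring]; exact ha2⟩
    have hge : b + 1 ≤ n.toNat / (4 * b) := (hdiv (b + 1)).2 (by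
      rw [show (b + 1) * (4 * b) = 4 * b * (b + 1) from by ring]; exact hcond)
    have hcard : tB n b = n.toNat / (4 * b) - b := by
      rw [tB, hset, Nat.card_Icc]; omega
    have hfl : PySem.Int.floordiv n (4 * (b : Int)) = ((n.toNat / (4 * b) : Nat) : Int) := by
      rw [PySem.Int.floordiv_eq_ediv_of_pos (by omega), ← hN]
      push_cast [Int.natCast_div]
      norm_num
    rw [hcard, hfl]
    push_cast [Nat.cast_sub (by omega : b ≤ n.toNat / (4 * b))]
    ring
  · have hz : ∀ j ∈ Finset.Icc b n.toNat, tB n j = 0 := by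
      intro j hj
      simp only [Finset.mem_Icc] at hj
      rw [tB, Finset.card_eq_zero, Finset.filter_eq_empty_iff]
      intro a ha
      simp only [Finset.mem_Icc] at ha
      rintro ⟨ha1, ha2⟩
      have hNc : n.toNat < 4 * b * (b + 1) := by
        have hcast : ((4 * b * (b + 1) : Nat) : Int) = 4 * (b : Int) * ((b : Int) + 1) := by
          push_cast; ring
        omega
      have h1 : 4 * (b + 1) * b ≤ 4 * (j + 1) * j := by nlinarith [hj.1]
      have h2 : 4 * (j + 1) * j ≤ 4 * a * j := by nlinarith [ha1]
      have h3 : 4 * b * (b + 1) = 4 * (b + 1) * b := by ring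
      omega
    rw [Finset.sum_eq_zero hz]; simp
termination_by n.toNat + 1 - b
decreasing_by
  have hb' : (1 : Int) ≤ (b : Int) := by exact_mod_cast hb
  have hbz : (b : Int) ≤ 4 * (b : Int) * ((b : Int) + 1) := by nlinarith [hb']
  omega

-- the counting swap: pairs (side, j) with hole = side - 2j  ↔  pairs (b, a) = (j, side - j)
lemma swap_counts (n : Int) (hn : 0 ≤ n) :
    (∑ j ∈ Finset.Icc 3 n.toNat, tA n (j : Int) 1) = ∑ b ∈ Finset.Icc 1 n.toNat, tB n b := by
  have hN : (n.toNat : Int) = n := Int.toNat_of_nonneg hn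
  have hA : (∑ j ∈ Finset.Icc 3 n.toNat, tA n (j : Int) 1)
      = ((Finset.Icc 3 n.toNat ×ˢ Finset.Icc 1 n.toNat).filter
          (fun p => 1 ≤ (p.1 : Int) - 2 * (p.2 : Int) ∧
            (p.1 : Int) ^ 2 - ((p.1 : Int) - 2 * (p.2 : Int)) ^ 2 ≤ n)).card := by
    rw [Finset.card_filter, Finset.sum_product]
    refine Finset.sum_congr rfl fun j hj => ?_
    rw [tA, Finset.card_filter]
  have hB : (∑ b ∈ Finset.Icc 1 n.toNat, tB n b)
      = ((Finset.Icc 1 n.toNat ×ˢ Finset.Icc 1 n.toNat).filter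
          (fun q => q.1 < q.2 ∧ 4 * q.2 * q.1 ≤ n.toNat)).card := by
    rw [Finset.card_filter, Finset.sum_product]
    refine Finset.sum_congr rfl fun b hb => ?_
    rw [tB, Finset.card_filter]
  rw [hA, hB]
  apply Finset.card_nbij' (i := fun p => (p.2, p.1 - p.2)) (j := fun q => (q.1 + q.2, q.1))
  · rintro ⟨s, k⟩ hp
    simp only [Finset.mem_coe, Finset.mem_filter, Finset.mem_product, Finset.mem_Icc] at hp ⊢
    obtain ⟨⟨⟨hs1, hs2⟩, hk1, hk2⟩, hc1, hc2⟩ := hp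
    have h2k : 2 * k + 1 ≤ s := by
      have : (2 : Int) * k + 1 ≤ s := by omega
      exact_mod_cast this
    have hks : k ≤ s := by omega
    have key : (s : Int) ^ 2 - ((s : Int) - 2 * (k : Int)) ^ 2
        = 4 * (k : Int) * ((s : Int) - (k : Int)) := by ring
    have hcast : ((s - k : Nat) : Int) = (s : Int) - (k : Int) := by
      push_cast [Nat.cast_sub hks]; ring
    have hineq : 4 * (s - k) * k ≤ n.toNat := by
      have : (4 : Int) * ((s - k : Nat) : Int) * (k : Int) ≤ (n.toNat : Int) := by
        rw [hcast, hN]; nlinarith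
      exact_mod_cast this
    refine ⟨⟨⟨by omega, by omega⟩, by omega, by omega⟩, by omega, hineq⟩
  · rintro ⟨b, a⟩ hq
    simp only [Finset.mem_coe, Finset.mem_filter, Finset.mem_product, Finset.mem_Icc] at hq ⊢
    obtain ⟨⟨⟨hb1, hb2⟩, ha1, ha2⟩, hba, hle⟩ := hq
    have hN8 : 8 ≤ n.toNat := by
      have : 8 ≤ 4 * a * b := by nlinarith
      omega
    have habN : b + a ≤ n.toNat := by
      have h4 : 4 * (a + b) ≤ 4 * a * b + 4 := by
        have : ((a : Int) - 1) * ((b : Int) - 1) ≥ 0 :=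
          mul_nonneg (by omega) (by omega)
        have hz : (4 : Int) * ((a : Int) + (b : Int)) ≤ 4 * (a : Int) * (b : Int) + 4 := by nlinarith
        exact_mod_cast hz
      omega
    have hkey : ((b + a : Nat) : Int) ^ 2 - (((b + a : Nat) : Int) - 2 * (b : Int)) ^ 2
        = 4 * (a : Int) * (b : Int) := by push_cast; ring
    refine ⟨⟨⟨by omega, habN⟩, by omega, by omega⟩, by push_cast; omega, ?_⟩
    rw [hkey, ← hN]
    exact_mod_cast hle
  · rintro ⟨s, k⟩ hp
    simp only [Finset.mem_coe, Finset.mem_filter, Finset.mem_product, Finset.mem_Icc] at hp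
    obtain ⟨⟨⟨hs1, hs2⟩, hk1, hk2⟩, hc1, hc2⟩ := hp
    have h2k : 2 * k + 1 ≤ s := by
      have : (2 : Int) * k + 1 ≤ s := by omega
      exact_mod_cast this
    show ((fun q : Nat × Nat => (q.1 + q.2, q.1)) ((fun p : Nat × Nat => (p.2, p.1 - p.2)) (s, k))) = (s, k)
    simp only [Prod.mk.injEq]
    constructor
    · omega
    · trivial
  · rintro ⟨b, a⟩ hq
    simp only [Finset.mem_coe, Finset.mem_filter, Finset.mem_product, Finset.mem_Icc] at hq
    show ((fun p : Nat × Nat => (p.2, p.1 - p.2)) ((fun q : Nat × Nat => (q.1 + q.2, q.1)) (b, a))) = (b, a)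
    simp only [Prod.mk.injEq]
    constructor
    · trivial
    · omega

lemma A_char (n : Int) (hn : 0 ≤ n) :
    laminae n = ((∑ j ∈ Finset.Icc 3 n.toNat, tA n (j : Int) 1 : Nat) : Int) := by
  have h3 : (3 : Int).toNat = 3 := rfl
  rw [laminae, outer_eq n hn 3 (by norm_num) 0, h3]
  omega

lemma B_char (n : Int) (hn : 0 ≤ n) :
    laminae_alt n = ((∑ b ∈ Finset.Icc 1 n.toNat, tB n b : Nat) : Int) := by
  rw [laminae_alt, show (1 : Int) = ((1 : Nat) : Int) from rfl, alt_eq n hn 1 le_rfl 0]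
  omega

-- ===== VERDICT (by name: the statement is the Claim_ definition above) =====
theorem laminae_spec : Claim_equal_laminae := by
  intro n _
  unfold Spec_laminae
  by_cases hn : 0 ≤ n
  · rw [A_char n hn, B_char n hn, swap_counts n hn]
  · rw [laminae, laminae_alt, laminaeOuter, laminaeAltLoop,
        dif_neg (by norm_num; omega : ¬ ((3:Int) ^ 2 - (3 - 2) ^ 2 ≤ n)),
        dif_neg (by norm_num; omega : ¬ ((4:Int) * 1 * (1 + 1) ≤ n))]
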